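-- pv_equiv track=rewrite | github.com/sue-zadeh/python-test | memorizing.py | third_min
-- ===== SOURCE A (Python) =====
-- def third_min(nums):
--     first = second = third = None
--
--     for i in range(len(nums)):
--         if nums[i] == first or nums[i] == second or nums[i] == third:
--             continue
--
--         if first is None or nums[i] < first:
--             third = second
--             second = first
--             first = nums[i]
--         elif second is None or nums[i] < second:
--             third = second
--             second = nums[i]
--         elif third is None or nums[i] < third:
--             third = nums[i]
--
--     if third is None:
--         return None
--     return third
-- ===== SOURCE B (Python) =====
-- def third_min(nums):
--     s = sorted(set(nums))
--     return s[2] if len(s) >= 3 else None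
-- ===== Notes on version B (the rewrite author's own statement) =====
-- stated objective: simpler
-- what changed: Replaces the one-pass three-variable tracking loop with sorting the distinct values and returning the element at index 2 when at least three exist.
import Mathlib
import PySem

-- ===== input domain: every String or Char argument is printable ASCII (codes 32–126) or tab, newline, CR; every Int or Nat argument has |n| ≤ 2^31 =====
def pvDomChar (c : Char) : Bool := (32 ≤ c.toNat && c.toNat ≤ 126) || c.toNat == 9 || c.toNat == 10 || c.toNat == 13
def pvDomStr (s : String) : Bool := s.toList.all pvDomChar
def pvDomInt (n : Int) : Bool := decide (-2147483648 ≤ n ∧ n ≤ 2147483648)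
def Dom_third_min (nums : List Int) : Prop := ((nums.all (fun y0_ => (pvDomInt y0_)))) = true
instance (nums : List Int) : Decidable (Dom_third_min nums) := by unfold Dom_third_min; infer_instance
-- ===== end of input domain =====

-- B replaces the one-pass three-variable tracking with sorting the distinct values and indexing; objective: simpler.

-- ===== PORT A =====
-- helper: Python's "v is None or x < v" on an optional tracked value
def ltOpt (x : Int) : Option Int → Bool
  | none => true
  | some v => decide (x < v)

-- loop body of A: skip duplicates of the three tracked values, then shift into first/second/third
def third_min_step (st : Option Int × Option Int × Option Int) (x : Int) :
    Option Int × Option Int × Option Int :=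
  let (first, second, third) := st
  if some x = first ∨ some x = second ∨ some x = third then st
  else if ltOpt x first then (some x, first, second)
  else if ltOpt x second then (first, some x, second)
  else if ltOpt x third then (first, second, some x)
  else st

def third_min (nums : List Int) : Option Int :=
  let st := nums.foldl third_min_step (none, none, none)
  st.2.2

-- ===== PORT B =====
def third_min_alt (nums : List Int) : Option Int :=
  let s := PySem.List.sorted (PySem.Set.ofList nums) (fun x => x) false
  if 3 ≤ s.length then s[2]? else none

-- ===== PRECONDITION & SPEC =====
def Spec_third_min (nums : List Int) (out : Option Int) : Prop := out = third_min_alt nums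
instance (nums : List Int) (out : Option Int) : Decidable (Spec_third_min nums out) := by unfold Spec_third_min; infer_instance

-- ===== CLAIM (what is proved, stated in full; the proofs are below) =====
def Claim_equal_third_min : Prop := ∀ (nums : List Int), Dom_third_min nums → Spec_third_min nums (third_min nums)

-- ===== LEMMAS AND PROOFS =====

-- ordered insert into a strictly sorted list, skipping an element already present
def sIns : List Int → Int → List Int
  | [], x => [x]
  | y :: ys, x => if x < y then x :: y :: ys else if x = y then y :: ys else y :: sIns ys x

theorem mem_sIns (S : List Int) (x a : Int) : a ∈ sIns S x ↔ a ∈ S ∨ a = x := by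
  induction S with
  | nil => simp [sIns]
  | cons y ys ih =>
    simp only [sIns]
    split_ifs with h1 h2
    · simp; tauto
    · subst h2; simp; tauto
    · simp [ih]; tauto

theorem pairwise_sIns (S : List Int) (x : Int) (h : S.Pairwise (· < ·)) :
    (sIns S x).Pairwise (· < ·) := by
  induction S with
  | nil => simp [sIns]
  | cons y ys ih =>
    rcases List.pairwise_cons.mp h with ⟨hy, hys⟩
    simp only [sIns]
    split_ifs with h1 h2
    · exact List.pairwise_cons.mpr ⟨by intro b hb; rcases List.mem_cons.mp hb with rfl | hb; exact h1; exact lt_trans h1 (hy b hb), h⟩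
    · exact h
    · refine List.pairwise_cons.mpr ⟨?_, ih hys⟩
      intro b hb
      rcases (mem_sIns ys x b).mp hb with hb | rfl
      · exact hy b hb
      · omega

theorem foldl_sIns_pairwise (l S : List Int) (h : S.Pairwise (· < ·)) :
    (l.foldl sIns S).Pairwise (· < ·) := by
  induction l generalizing S with
  | nil => exact h
  | cons x xs ih => exact ih _ (pairwise_sIns S x h)

theorem mem_foldl_sIns (l S : List Int) (a : Int) :
    a ∈ l.foldl sIns S ↔ a ∈ S ∨ a ∈ l := by
  induction l generalizing S with
  | nil => simp
  | cons x xs ih => simp [List.foldl_cons, ih, mem_sIns]; tauto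

-- A's step on the first three elements of a strictly sorted list IS sIns on the first three
theorem step_sIns (S : List Int) (x : Int) (h : S.Pairwise (· < ·)) :
    third_min_step (S[0]?, S[1]?, S[2]?) x
      = ((sIns S x)[0]?, (sIns S x)[1]?, (sIns S x)[2]?) := by
  match S with
  | [] => simp [third_min_step, sIns, ltOpt]
  | [a] =>
    simp only [third_min_step, sIns, ltOpt]
    split_ifs <;> simp_all
  | [a, b] =>
    have hab : a < b := (List.pairwise_cons.mp h).1 b (by simp)
    simp only [third_min_step, sIns, ltOpt]
    split_ifs <;> simp_all <;> omega
  | a :: b :: c :: rest =>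
    rcases List.pairwise_cons.mp h with ⟨ha, h'⟩
    rcases List.pairwise_cons.mp h' with ⟨hb, _⟩
    have hab : a < b := ha b (by simp)
    have hac : a < c := ha c (by simp)
    have hbc : b < c := hb c (by simp)
    clear ha hb h h'
    simp only [third_min_step, sIns, ltOpt]
    split_ifs <;> simp_all <;> omega

theorem foldl_step_eq (l : List Int) (S : List Int) (h : S.Pairwise (· < ·)) :
    l.foldl third_min_step (S[0]?, S[1]?, S[2]?)
      = ((l.foldl sIns S)[0]?, (l.foldl sIns S)[1]?, (l.foldl sIns S)[2]?) := by
  induction l generalizing S with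
  | nil => rfl
  | cons x xs ih =>
    simp only [List.foldl_cons, step_sIns S x h]
    exact ih _ (pairwise_sIns S x h)

theorem sorted_ofList_eq_foldl_sIns (nums : List Int) :
    PySem.List.sorted (PySem.Set.ofList nums) (fun x => x) false = nums.foldl sIns [] := by
  apply PySem.List.sorted_eq_of_perm_of_pairwise_lt
  · -- (nums.foldl sIns []).Perm (Set.ofList nums)
    have hn1 : (nums.foldl sIns []).Nodup :=
      (foldl_sIns_pairwise nums [] (by simp)).nodup
    have hn2 : (PySem.Set.ofList nums).Nodup := PySem.Set.nodup_ofList nums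
    apply List.perm_of_nodup_nodup_toFinset_eq hn1 hn2
    ext a
    simp [mem_foldl_sIns, PySem.Set.mem_ofList]
  · simpa using foldl_sIns_pairwise nums [] (by simp)

-- ===== VERDICT (by name: the statement is the Claim_ definition above) =====
theorem third_min_spec : Claim_equal_third_min := by
  intro nums _
  show third_min nums = third_min_alt nums
  unfold third_min third_min_alt
  rw [sorted_ofList_eq_foldl_sIns]
  have h0 : ((([] : List Int))[0]?, (([] : List Int))[1]?, (([] : List Int))[2]?)
      = ((none : Option Int), (none : Option Int), (none : Option Int)) := rfl
  rw [← h0, foldl_step_eq nums [] (by simp)]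
  simp only []
  by_cases h : 3 ≤ (nums.foldl sIns []).length
  · simp [h]
  · simp [h, List.getElem?_eq_none (by omega : (nums.foldl sIns []).length ≤ 2)]
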